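-- pv_equiv track=rewrite | github.com/Aftaab99/Context-based-QnA-system | GenerateData.py | map_word_to_context
-- ===== SOURCE A (Python) =====
-- def map_word_to_context(context_words, start_char_index):
-- 	char_count = 0
-- 	word_count = 0
-- 	for word in context_words:
-- 		if char_count == start_char_index:
-- 			return word_count
-- 		char_count += len(word)
-- 		word_count += 1
-- 	return None
-- ===== SOURCE B (Python) =====
-- def map_word_to_context(context_words, start_char_index):
--     offsets = {}
--     char_count = 0
--     for i, word in enumerate(context_words):
--         offsets.setdefault(char_count, i)
--         char_count += len(word)
--     return offsets.get(start_char_index)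
-- ===== Notes on version B (the rewrite author's own statement) =====
-- stated objective: alternative
-- what changed: Replaces A's fused scan with early return by a build-then-lookup decomposition: one pass builds a dict mapping each prefix character offset to its first word index (setdefault keeps the first on duplicate offsets from empty words, and the offset after the last word is never inserted), then the answer is a single dict.get.
import Mathlib
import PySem

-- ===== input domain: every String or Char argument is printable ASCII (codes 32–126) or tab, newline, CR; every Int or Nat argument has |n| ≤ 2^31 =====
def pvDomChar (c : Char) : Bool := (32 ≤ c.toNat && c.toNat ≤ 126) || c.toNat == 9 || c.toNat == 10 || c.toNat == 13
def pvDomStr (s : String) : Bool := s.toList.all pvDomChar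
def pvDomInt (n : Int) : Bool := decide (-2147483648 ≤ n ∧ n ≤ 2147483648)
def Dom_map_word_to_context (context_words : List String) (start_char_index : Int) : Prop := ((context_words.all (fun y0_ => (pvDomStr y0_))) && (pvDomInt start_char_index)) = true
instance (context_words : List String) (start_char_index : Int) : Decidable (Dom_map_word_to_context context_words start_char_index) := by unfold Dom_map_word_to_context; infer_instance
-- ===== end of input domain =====

-- B replaces A's fused scan-with-early-return by building a dict of prefix offsets once, then a single lookup (alternative decomposition, same cost).

-- ===== PORT A =====
-- the for-loop with early return, as structural recursion over the words with state (char_count, word_count)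
def mapLoopA (start : Int) : List String → Int → Int → Option Int
  | [], _, _ => none
  | w :: ws, char_count, word_count =>
      if char_count = start then some word_count
      else mapLoopA start ws (char_count + PySem.Str.len w) (word_count + 1)

def map_word_to_context (context_words : List String) (start_char_index : Int) : Option Int :=
  mapLoopA start_char_index context_words 0 0

-- ===== PORT B =====
-- the build loop: state (offsets dict, char_count, i); enumerate's index i carried explicitly
def buildOffsets : List String → PySem.Dict Int Int × Int × Int → PySem.Dict Int Int × Int × Int
  | [], st => st
  | w :: ws, (d, char_count, i) =>
      buildOffsets ws (d.setdefault char_count i, char_count + PySem.Str.len w, i + 1)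

def map_word_to_context_alt (context_words : List String) (start_char_index : Int) : Option Int :=
  (buildOffsets context_words (PySem.Dict.empty, 0, 0)).1.get? start_char_index

-- ===== PRECONDITION & SPEC =====
def Spec_map_word_to_context (context_words : List String) (start_char_index : Int) (out : Option Int) : Prop := out = map_word_to_context_alt context_words start_char_index
instance (context_words : List String) (start_char_index : Int) (out : Option Int) : Decidable (Spec_map_word_to_context context_words start_char_index out) := by unfold Spec_map_word_to_context; infer_instance

-- ===== CLAIM (what is proved, stated in full; the proofs are below) =====
def Claim_equal_map_word_to_context : Prop := ∀ (context_words : List String) (start_char_index : Int), Dom_map_word_to_context context_words start_char_index → Spec_map_word_to_context context_words start_char_index (map_word_to_context context_words start_char_index)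

-- ===== LEMMAS AND PROOFS =====

theorem get?_mk_append_single (items : List (Int × Int)) (k v x : Int) :
    (PySem.Dict.mk (items ++ [(k, v)]) : PySem.Dict Int Int).get? x =
      ((PySem.Dict.mk items : PySem.Dict Int Int).get? x).or (if k = x then some v else none) := by
  induction items with
  | nil =>
      simp only [List.nil_append, PySem.Dict.get?_mk_cons]
      by_cases hk : k = x <;> simp [hk, PySem.Dict.get?]
  | cons p rest ih =>
      obtain ⟨pk, pv⟩ := p
      simp only [List.cons_append, PySem.Dict.get?_mk_cons]
      by_cases hp : (pk == x) = true
      · simp [hp]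
      · simp only [hp]
        exact ih

theorem get?_setdefault (d : PySem.Dict Int Int) (k v : Int) (x : Int) :
    (d.setdefault k v).get? x = (d.get? x).or (if k = x then some v else none) := by
  unfold PySem.Dict.setdefault
  by_cases hc : d.contains k
  · rw [if_pos hc]
    rcases h : d.get? x with _ | val
    · by_cases hk : k = x
      · subst hk
        rw [PySem.Dict.contains_eq_isSome_get?, h] at hc; simp at hc
      · simp [hk]
    · simp
  · rw [if_neg hc]
    rcases d with ⟨items⟩
    exact get?_mk_append_single items k v x

theorem build_get? (start : Int) (ws : List String) (d : PySem.Dict Int Int) (cc i : Int) :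
    (buildOffsets ws (d, cc, i)).1.get? start =
      (d.get? start).or (mapLoopA start ws cc i) := by
  induction ws generalizing d cc i with
  | nil => simp [buildOffsets, mapLoopA]
  | cons w ws ih =>
      simp only [buildOffsets, mapLoopA]
      rw [ih, get?_setdefault]
      rcases d.get? start with _ | v
      · by_cases hk : cc = start <;> simp [hk]
      · simp

-- ===== VERDICT (by name: the statement is the Claim_ definition above) =====
theorem map_word_to_context_spec : Claim_equal_map_word_to_context := by
  intro ws start _
  unfold Spec_map_word_to_context map_word_to_context map_word_to_context_alt
  rw [build_get?]
  simp [PySem.Dict.get?_empty]
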